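-- pv_equiv track=rewrite | github.com/baschni/21norm | norm_file.py | check_right_position_of_asterix
-- ===== SOURCE A (Python) =====
-- def check_asterix_after_space(line, middle_space = None):
-- 	line = line.strip()
-- 	begin, end = get_right_space_boundary(line)
-- 	if begin is None or end is None:
-- 		return line
-- 	left = line[:end + 1]
-- 	middle = line[end + 1:begin + 1]
-- 	right = line[begin + 1:]
-- 	if left[-1] == "*":
-- 		left = left[:-1]
-- 		right = "*" + right
-- 	if middle_space is None:
-- 		return(left + middle + right)
-- 	else:
-- 		return(left + middle_space + right)
--
-- def get_right_space_boundary(text):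
-- 	begin = None
-- 	end = None
-- 	for index, c in enumerate(reversed(text)):
-- 		if begin is None and c.isspace():
-- 			begin = len(text) - index - 1
-- 		if begin is not None and not c.isspace():
-- 			end = len(text) - index - 1
-- 			break
-- 	return (begin, end)
--
-- def check_right_position_of_asterix(line, positional):
-- 	if positional["function_definition"]:
-- 		[left, right] = line.split("(", 1)
-- 		left = check_asterix_after_space(left, "\t")
-- 		right = right[:-1]
-- 		args = right.split(",")
-- 		args = [check_asterix_after_space(arg, " ") for arg in args]
-- 		return (left + "(" + ", ".join(args) + ")")
--
-- 	if positional["variable_block"]: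
-- 		return (check_asterix_after_space(line))
--
-- 	return line
-- ===== SOURCE B (Python) =====
-- def _reposition(line, middle_space=None):
-- 	s = line.strip()
-- 	left, middle, right = "", "", ""
-- 	for c in s:
-- 		if c.isspace():
-- 			if right == "":
-- 				middle += c
-- 			else:
-- 				left += middle + right
-- 				middle, right = c, ""
-- 		else:
-- 			right += c
-- 	if middle == "":
-- 		return s
-- 	if left.endswith("*"):
-- 		left, right = left[:-1], "*" + right
-- 	return left + (middle if middle_space is None else middle_space) + right
--
-- def check_right_position_of_asterix(line, positional):
-- 	if positional["function_definition"]: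
-- 		head, tail = line.split("(", 1)
-- 		args = [_reposition(a, " ") for a in tail[:-1].split(",")]
-- 		return _reposition(head, "\t") + "(" + ", ".join(args) + ")"
-- 	if positional["variable_block"]:
-- 		return _reposition(line)
-- 	return line
-- ===== Notes on version B (the rewrite author's own statement) =====
-- stated objective: alternative
-- what changed: The asterisk-repositioning core replaces A's reverse enumerate-scan (get_right_space_boundary) with sentinel begin/end indices plus index-arithmetic slicing by a single forward pass that accumulates the three parts (left, last whitespace run, trailing token) directly and reassembles them.
import Mathlib
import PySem

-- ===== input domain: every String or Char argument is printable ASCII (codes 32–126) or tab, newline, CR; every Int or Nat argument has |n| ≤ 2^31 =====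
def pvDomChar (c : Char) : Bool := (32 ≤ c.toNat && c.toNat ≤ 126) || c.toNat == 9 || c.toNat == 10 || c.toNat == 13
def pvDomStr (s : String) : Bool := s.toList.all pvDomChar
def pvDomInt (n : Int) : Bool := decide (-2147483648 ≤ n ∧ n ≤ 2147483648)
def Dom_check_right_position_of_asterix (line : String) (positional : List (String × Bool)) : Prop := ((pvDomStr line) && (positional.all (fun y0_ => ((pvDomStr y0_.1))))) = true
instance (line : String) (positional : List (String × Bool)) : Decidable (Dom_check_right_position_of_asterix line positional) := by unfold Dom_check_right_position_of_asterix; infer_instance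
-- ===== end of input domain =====

-- B replaces A's reverse index-scan boundary finder (get_right_space_boundary) plus
-- index-arithmetic slicing by one forward pass that accumulates the three parts
-- (left, last whitespace run, trailing token) directly; objective: alternative.

-- ===== PORT A =====
-- literal port of get_right_space_boundary's loop: for index, c in enumerate(reversed(text))
def pvGrsLoop (n : Nat) : List Char → Nat → Option Int → Option Int × Option Int
  | [], _, b => (b, none)
  | c :: rest, i, b =>
      let b' := if b == none && PySem.Chars.isspace c then some ((n : Int) - i - 1) else b
      if b' != none && !PySem.Chars.isspace c then (b', some ((n : Int) - i - 1))
      else pvGrsLoop n rest (i + 1) b'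

def pvGetRightSpaceBoundary (text : List Char) : Option Int × Option Int :=
  pvGrsLoop text.length text.reverse 0 none

-- literal port of check_asterix_after_space (on code points)
def pvCheckAsterixAfterSpace (line : List Char) (middle_space : Option (List Char)) : List Char :=
  let l := PySem.Chars.strip line
  match pvGetRightSpaceBoundary l with
  | (some b, some e) =>
      let left := PySem.List.slice l none (some (e + 1))
      let middle := PySem.List.slice l (some (e + 1)) (some (b + 1))
      let right := PySem.List.slice l (some (b + 1)) none
      let lr := if PySem.List.pyGet? left (-1) == some '*' then
          (PySem.List.slice left none (some (-1)), '*' :: right)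
        else (left, right)
      match middle_space with
      | none => lr.1 ++ middle ++ lr.2
      | some ms => lr.1 ++ ms ++ lr.2
  | _ => l

def check_right_position_of_asterix (line : String) (positional : List (String × Bool)) : String :=
  match positional.lookup "function_definition" with
  | some true =>
    (match PySem.Chars.splitMax? line.toList ['('] 1 with
     | some [left, right] =>
        let left := pvCheckAsterixAfterSpace left (some ['\t'])
        let right := PySem.List.slice right none (some (-1))
        let args := (PySem.Chars.splitOn right [',']).map (fun a => pvCheckAsterixAfterSpace a (some [' ']))
        String.ofList (left ++ ['('] ++ PySem.Chars.join [',', ' '] args ++ [')'])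
     | _ => line)  -- Python raises ValueError here (no '(' in line); excluded by Pre_
  | some _fd =>
    (match positional.lookup "variable_block" with
     | some true => String.ofList (pvCheckAsterixAfterSpace line.toList none)
     | some _vb => line
     | none => line)  -- missing key raises KeyError in Python; excluded by Pre_
  | none => line  -- missing key raises KeyError in Python; excluded by Pre_

-- ===== PORT B =====
-- one forward pass accumulating (left, middle, right)
def pvScanStep (st : List Char × List Char × List Char) (c : Char) : List Char × List Char × List Char :=
  if PySem.Chars.isspace c then
    if st.2.2 = [] then (st.1, st.2.1 ++ [c], st.2.2)
    else (st.1 ++ st.2.1 ++ st.2.2, [c], [])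
  else (st.1, st.2.1, st.2.2 ++ [c])

def pvReposition (line : List Char) (middle_space : Option (List Char)) : List Char :=
  let s := PySem.Chars.strip line
  let lmr := s.foldl pvScanStep ([], [], [])
  if lmr.2.1 = [] then s
  else
    let lr := if PySem.Chars.endswith lmr.1 ['*'] then
        (PySem.List.slice lmr.1 none (some (-1)), '*' :: lmr.2.2)
      else (lmr.1, lmr.2.2)
    lr.1 ++ (middle_space.getD lmr.2.1) ++ lr.2

def check_right_position_of_asterix_alt (line : String) (positional : List (String × Bool)) : String :=
  -- positional["function_definition"] / ["variable_block"]: KeyError (missing key) is excluded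
  -- by Pre_, so the getD default is never consulted on admitted inputs
  if (positional.lookup "function_definition").getD false then
    let parts := (PySem.Chars.splitMax? line.toList ['('] 1).getD []
    -- 'head, tail = line.split("(", 1)': destructured via headD/tail; ValueError (no '(',
    -- so a single piece) is excluded by Pre_
    if parts.length = 2 then
      let head := parts.headD []
      let tail := PySem.List.slice (parts.tail.headD []) none (some (-1))
      let args := (PySem.Chars.splitOn tail [',']).map (fun a => pvReposition a (some [' ']))
      String.ofList (pvReposition head (some ['\t']) ++ ['('] ++ PySem.Chars.join [',', ' '] args ++ [')'])
    else line
  else if (positional.lookup "variable_block").getD false then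
    String.ofList (pvReposition line.toList none)
  else
    line

-- ===== PRECONDITION & SPEC =====
-- Pre_ excludes exactly the inputs where the Python A raises: a missing "function_definition"
-- key (KeyError), a function-definition line without '(' (ValueError on unpacking the split),
-- and a missing "variable_block" key when it is consulted (KeyError).
def Pre_check_right_position_of_asterix (line : String) (positional : List (String × Bool)) : Prop :=
  (positional.lookup "function_definition" = some true ∧ '(' ∈ line.toList) ∨
  (positional.lookup "function_definition" = some false ∧ (positional.lookup "variable_block").isSome)
instance (line : String) (positional : List (String × Bool)) : Decidable (Pre_check_right_position_of_asterix line positional) := by unfold Pre_check_right_position_of_asterix; infer_instance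

def pvWitness_check_right_position_of_asterix : String × (List (String × Bool)) :=
  ("def f(a, *b):", [("function_definition", true), ("variable_block", false)])

def Spec_check_right_position_of_asterix (line : String) (positional : List (String × Bool)) (out : String) : Prop := out = check_right_position_of_asterix_alt line positional
instance (line : String) (positional : List (String × Bool)) (out : String) : Decidable (Spec_check_right_position_of_asterix line positional out) := by unfold Spec_check_right_position_of_asterix; infer_instance

-- ===== CLAIM (what is proved, stated in full; the proofs are below) =====
def Claim_equal_check_right_position_of_asterix : Prop := ∀ (line : String) (positional : List (String × Bool)), Dom_check_right_position_of_asterix line positional → Pre_check_right_position_of_asterix line positional → Spec_check_right_position_of_asterix line positional (check_right_position_of_asterix line positional)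

-- ===== LEMMAS AND PROOFS =====
-- canonical decomposition of a string, seen from the right: pvRt = the trailing run of
-- non-space characters (reversed), pvRm = the whitespace run before it (reversed),
-- pvLp = everything to their left
def pvRt (s : List Char) : List Char := s.reverse.takeWhile (fun c => !PySem.Chars.isspace c)

def pvRm (s : List Char) : List Char := (s.reverse.dropWhile (fun c => !PySem.Chars.isspace c)).takeWhile PySem.Chars.isspace

def pvLp (s : List Char) : List Char := (s.reverse.drop ((pvRt s).length + (pvRm s).length)).reverse

theorem pv_rev_eq (s : List Char) : s.reverse = pvRt s ++ pvRm s ++ (s.reverse.dropWhile (fun c => !PySem.Chars.isspace c)).dropWhile PySem.Chars.isspace := by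
  unfold pvRt pvRm
  rw [List.append_assoc, List.takeWhile_append_dropWhile, List.takeWhile_append_dropWhile]

theorem pv_lp_eq (s : List Char) : pvLp s = ((s.reverse.dropWhile (fun c => !PySem.Chars.isspace c)).dropWhile PySem.Chars.isspace).reverse := by
  unfold pvLp
  congr 1
  conv_lhs => rw [pv_rev_eq s]
  rw [show (pvRt s).length + (pvRm s).length = (pvRt s ++ pvRm s).length by simp, List.drop_left]

theorem pv_decomp (s : List Char) : pvLp s ++ (pvRm s).reverse ++ (pvRt s).reverse = s := by
  rw [pv_lp_eq]
  conv_rhs => rw [← List.reverse_reverse s]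
  conv_rhs => rw [pv_rev_eq s]
  simp [List.reverse_append]

theorem pv_foldB (s : List Char) : s.foldl pvScanStep ([], [], []) = (pvLp s, (pvRm s).reverse, (pvRt s).reverse) := by
  induction s using List.reverseRecOn with
  | nil => simp [pvLp, pvRm, pvRt]
  | append_singleton s c ih =>
    rw [List.foldl_append, List.foldl_cons, List.foldl_nil, ih]
    have hrev : (s ++ [c]).reverse = c :: s.reverse := by simp
    by_cases hc : PySem.Chars.isspace c
    · by_cases hrt : pvRt s = []
      · have hdw : s.reverse.dropWhile (fun c => !PySem.Chars.isspace c) = s.reverse := by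
          unfold pvRt at hrt
          cases hsr : s.reverse with
          | nil => simp
          | cons d t =>
            rw [hsr, List.takeWhile_cons] at hrt
            rw [List.dropWhile_cons]
            by_cases hd : PySem.Chars.isspace d
            · simp [hd]
            · simp [hd] at hrt
        have h1 : pvRt (s ++ [c]) = [] := by
          unfold pvRt; rw [hrev, List.takeWhile_cons]; simp [hc]
        have h2 : pvRm (s ++ [c]) = c :: pvRm s := by
          unfold pvRm; rw [hrev, List.dropWhile_cons]
          simp only [hc, Bool.not_true, Bool.false_eq_true, reduceIte]
          rw [List.takeWhile_cons, if_pos hc, hdw]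
        have h3 : pvLp (s ++ [c]) = pvLp s := by
          rw [pv_lp_eq, pv_lp_eq, hrev, List.dropWhile_cons]
          simp only [hc, Bool.not_true, Bool.false_eq_true, reduceIte]
          rw [List.dropWhile_cons, if_pos hc, hdw]
        rw [h1, h2, h3]
        simp [pvScanStep, hc, hrt]
      · obtain ⟨d, t, hsr, hd⟩ : ∃ d t, s.reverse = d :: t ∧ PySem.Chars.isspace d = false := by
          unfold pvRt at hrt
          cases hsr : s.reverse with
          | nil => rw [hsr] at hrt; simp at hrt
          | cons d t =>
            refine ⟨d, t, rfl, ?_⟩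
            rw [hsr, List.takeWhile_cons] at hrt
            by_cases hd : PySem.Chars.isspace d
            · simp [hd] at hrt
            · exact eq_false_of_ne_true hd
        have h1 : pvRt (s ++ [c]) = [] := by
          unfold pvRt; rw [hrev, List.takeWhile_cons]; simp [hc]
        have h2 : pvRm (s ++ [c]) = [c] := by
          unfold pvRm; rw [hrev, List.dropWhile_cons]
          simp only [hc, Bool.not_true, Bool.false_eq_true, reduceIte]
          rw [List.takeWhile_cons, if_pos hc, hsr, List.takeWhile_cons, if_neg (by simp [hd])]
        have h3 : pvLp (s ++ [c]) = s := by
          rw [pv_lp_eq, hrev, List.dropWhile_cons]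
          simp only [hc, Bool.not_true, Bool.false_eq_true, reduceIte]
          rw [List.dropWhile_cons, if_pos hc, hsr, List.dropWhile_cons, if_neg (by simp [hd]), ← hsr, List.reverse_reverse]
        have hrne : (pvRt s).reverse ≠ [] := by simpa using hrt
        rw [h1, h2, h3]
        simp only [pvScanStep, hc, if_pos, reduceIte, hrne]
        rw [pv_decomp]
        simp
    · have h1 : pvRt (s ++ [c]) = c :: pvRt s := by
        unfold pvRt; rw [hrev, List.takeWhile_cons]; simp [hc]
      have h2 : pvRm (s ++ [c]) = pvRm s := by
        unfold pvRm; rw [hrev, List.dropWhile_cons]; simp [hc]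
      have h3 : pvLp (s ++ [c]) = pvLp s := by
        rw [pv_lp_eq, pv_lp_eq]
        rw [hrev, List.dropWhile_cons]; simp [hc]
      rw [h1, h2, h3]
      simp [pvScanStep, hc]

theorem pv_dw_head {p : Char → Bool} {l t : List Char} {c : Char}
    (h : l.dropWhile p = c :: t) : p c = false := by
  induction l with
  | nil => simp at h
  | cons a l ih =>
    rw [List.dropWhile_cons] at h
    by_cases ha : p a
    · rw [if_pos ha] at h; exact ih h
    · rw [if_neg ha] at h
      cases h; exact eq_false_of_ne_true ha

theorem pv_P1 (n : Nat) (pre : List Char) (hpre : ∀ c ∈ pre, PySem.Chars.isspace c = false) :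
    ∀ (tail : List Char) (i : Nat), pvGrsLoop n (pre ++ tail) i none = pvGrsLoop n tail (i + pre.length) none := by
  induction pre with
  | nil => intro tail i; simp
  | cons c pre ih =>
    intro tail i
    have hc : PySem.Chars.isspace c = false := hpre c (by simp)
    rw [List.cons_append]
    simp only [pvGrsLoop, hc]
    norm_num
    rw [ih (fun d hd => hpre d (by simp [hd])) tail (i + 1)]
    congr 1
    omega

theorem pv_P2 (n : Nat) (sp : List Char) (hsp : ∀ c ∈ sp, PySem.Chars.isspace c = true) :
    ∀ (tail : List Char) (i : Nat) (b : Int), pvGrsLoop n (sp ++ tail) i (some b) = pvGrsLoop n tail (i + sp.length) (some b) := by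
  induction sp with
  | nil => intro tail i b; simp
  | cons c sp ih =>
    intro tail i b
    have hc : PySem.Chars.isspace c = true := hsp c (by simp)
    rw [List.cons_append]
    simp only [pvGrsLoop, hc]
    norm_num
    rw [ih (fun d hd => hsp d (by simp [hd])) tail (i + 1)]
    congr 1
    omega

theorem pv_grs_none (s : List Char) (h : pvRm s = []) : pvGetRightSpaceBoundary s = (none, none) := by
  have hdw : s.reverse.dropWhile (fun c => !PySem.Chars.isspace c) = [] := by
    cases hsd : s.reverse.dropWhile (fun c => !PySem.Chars.isspace c) with
    | nil => rfl
    | cons d t =>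
      have hd : PySem.Chars.isspace d = true := by
        have := pv_dw_head hsd; simpa using this
      unfold pvRm at h
      rw [hsd, List.takeWhile_cons, if_pos hd] at h
      simp at h
  have hrev : s.reverse = pvRt s := by
    conv_lhs => rw [← List.takeWhile_append_dropWhile (p := fun c => !PySem.Chars.isspace c) (l := s.reverse)]
    rw [hdw]; simp [pvRt]
  unfold pvGetRightSpaceBoundary
  rw [hrev, show pvRt s = pvRt s ++ [] by simp,
    pv_P1 s.length (pvRt s) (fun c hc => by simpa using List.mem_takeWhile_imp hc)]
  rfl

theorem pv_grs_some (s : List Char) (h : pvRm s ≠ []) :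
    pvGetRightSpaceBoundary s =
      (some ((s.length : Int) - (pvRt s).length - 1),
       if (pvRt s).length + (pvRm s).length = s.length then none
       else some ((s.length : Int) - (pvRt s).length - (pvRm s).length - 1)) := by
  obtain ⟨d, rm', hrm⟩ : ∃ d rm', pvRm s = d :: rm' := by
    cases hx : pvRm s with
    | nil => exact absurd hx h
    | cons d rm' => exact ⟨d, rm', rfl⟩
  have hd : PySem.Chars.isspace d = true := by
    have : d ∈ pvRm s := by rw [hrm]; simp
    exact List.mem_takeWhile_imp this
  have hsp' : ∀ c ∈ rm', PySem.Chars.isspace c = true := by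
    intro c hc
    have : c ∈ pvRm s := by rw [hrm]; simp [hc]
    exact List.mem_takeWhile_imp this
  set rest2 := (s.reverse.dropWhile (fun c => !PySem.Chars.isspace c)).dropWhile PySem.Chars.isspace with hrest2
  have hrev : s.reverse = pvRt s ++ (pvRm s ++ rest2) := by
    rw [← List.append_assoc]; exact pv_rev_eq s
  have hpm : (pvRm s).length = rm'.length + 1 := by rw [hrm]; simp
  have hlen : s.length = (pvRt s).length + (pvRm s).length + rest2.length := by
    have := congrArg List.length hrev
    simp at this
    omega
  unfold pvGetRightSpaceBoundary
  conv_lhs => rw [hrev, pv_P1 s.length (pvRt s) (fun c hc => by simpa using List.mem_takeWhile_imp hc)]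
  rw [hrm, List.cons_append]
  simp only [pvGrsLoop, hd]
  norm_num
  rw [pv_P2 s.length rm' hsp']
  cases hr2 : rest2 with
  | nil =>
    have hr2l : rest2.length = 0 := by rw [hr2]; rfl
    rw [if_pos (by omega)]
    rfl
  | cons e t2 =>
    have he : PySem.Chars.isspace e = false := pv_dw_head hr2
    have hr2l : rest2.length = t2.length + 1 := by rw [hr2]; simp
    rw [if_neg (by omega)]
    simp only [pvGrsLoop, he]
    norm_num
    rw [if_neg (by simp)]
    have harith : ((s.length : Int) - ((pvRt s).length + 1 + rm'.length) - 1)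
        = (s.length : Int) - (pvRt s).length - (rm'.length + 1) - 1 := by ring
    rw [harith]

theorem pv_last_star (l : List Char) :
    (PySem.List.pyGet? l (-1) == some '*') = PySem.Chars.endswith l ['*'] := by
  induction l using List.reverseRecOn with
  | nil => decide
  | append_singleton ys a _ =>
    have h1 : PySem.List.pyGet? (ys ++ [a]) (-1) = some a := by
      simp [PySem.List.pyGet?, PySem.List.pyIdx?]
    have h2 : PySem.Chars.endswith (ys ++ [a]) ['*'] = (a == '*') := by
      cases hb : PySem.Chars.endswith (ys ++ [a]) ['*'] with
      | true =>
        obtain ⟨u, hu⟩ := (PySem.Chars.endswith_iff _ _).mp hb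
        obtain ⟨-, h⟩ := List.append_inj' hu rfl
        cases h
        simp
      | false =>
        by_cases ha : a = '*'
        · subst ha
          rw [(PySem.Chars.endswith_iff _ _).mpr ⟨ys, rfl⟩] at hb
          exact absurd hb (by simp)
        · simp [ha]
    rw [h1, h2]
    simp

theorem pv_strip_head (x : List Char) (c : Char) (t : List Char)
    (h : PySem.Chars.strip x = c :: t) : PySem.Chars.isspace c = false := by
  unfold PySem.Chars.strip PySem.Chars.rstrip at h
  set y := PySem.Chars.lstrip x with hy
  have hyc : ∃ t', y = c :: t' := by
    have hpre : (y.reverse.dropWhile PySem.Chars.isspace).reverse <+: y := by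
      obtain ⟨u, hu⟩ := List.dropWhile_suffix (l := y.reverse) (p := PySem.Chars.isspace)
      exact ⟨u.reverse, by rw [← List.reverse_append, hu, List.reverse_reverse]⟩
    rw [h] at hpre
    obtain ⟨r, hr⟩ := hpre
    exact ⟨t ++ r, by rw [← hr]; simp⟩
  obtain ⟨t', ht'⟩ := hyc
  have hidem : y.dropWhile PySem.Chars.isspace = y := by
    rw [hy]; unfold PySem.Chars.lstrip
    exact List.dropWhile_idempotent _ _
  rw [ht', List.dropWhile_cons] at hidem
  by_cases hc : PySem.Chars.isspace c
  · rw [if_pos hc] at hidem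
    have hlen := congrArg List.length hidem
    have hsub : (t'.dropWhile PySem.Chars.isspace).length ≤ t'.length := List.length_dropWhile_le _ _
    simp at hlen
    omega
  · exact eq_false_of_ne_true hc

theorem pv_helper_eq (x : List Char) (ms : Option (List Char)) :
    pvCheckAsterixAfterSpace x ms = pvReposition x ms := by
  simp only [pvCheckAsterixAfterSpace, pvReposition]
  rw [pv_foldB]
  set s := PySem.Chars.strip x with hs
  by_cases h : pvRm s = []
  · rw [pv_grs_none s h, h]
    simp
  · have hlen : (pvLp s).length + (pvRm s).length + (pvRt s).length = s.length := by
      have h0 := congrArg List.length (pv_decomp s)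
      simp at h0
      omega
    have hnotall : ¬ ((pvRt s).length + (pvRm s).length = s.length) := by
      intro hEq
      have hlp : (pvLp s).length = 0 := by omega
      have hlpnil : pvLp s = [] := List.length_eq_zero_iff.mp hlp
      obtain ⟨d, u, hdu⟩ : ∃ d u, (pvRm s).reverse = d :: u := by
        cases hq : (pvRm s).reverse with
        | nil => exact absurd (by simpa using hq) h
        | cons d u => exact ⟨d, u, rfl⟩
      have hd : PySem.Chars.isspace d = true := by
        have : d ∈ pvRm s := by
          have : d ∈ (pvRm s).reverse := by rw [hdu]; simp
          simpa using this
        exact List.mem_takeWhile_imp this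
      have hsd : PySem.Chars.strip x = d :: (u ++ (pvRt s).reverse) := by
        rw [← hs]
        conv_lhs => rw [← pv_decomp s]
        rw [hlpnil, hdu]
        simp
      have := pv_strip_head x d _ hsd
      rw [hd] at this
      exact absurd this (by simp)
    rw [pv_grs_some s h, if_neg hnotall]
    dsimp only
    have hrtrm : (pvRt s).length + (pvRm s).length ≤ s.length := by omega
    have he1 : ((s.length : Int) - (pvRt s).length - (pvRm s).length - 1) + 1
        = ((s.length - (pvRt s).length - (pvRm s).length : Nat) : Int) := by omega
    have hb1 : ((s.length : Int) - (pvRt s).length - 1) + 1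
        = ((s.length - (pvRt s).length : Nat) : Int) := by omega
    have hlplen : (pvLp s).length = s.length - (pvRt s).length - (pvRm s).length := by omega
    have hdec1 : s = pvLp s ++ ((pvRm s).reverse ++ (pvRt s).reverse) := by
      rw [← List.append_assoc, pv_decomp s]
    have hdec2 : s = (pvLp s ++ (pvRm s).reverse) ++ (pvRt s).reverse := by
      rw [List.append_assoc, ← hdec1]
    have hL : PySem.List.slice s none (some (((s.length : Int) - (pvRt s).length - (pvRm s).length - 1) + 1)) = pvLp s := by
      rw [he1, PySem.List.slice_to s (by positivity), Int.toNat_natCast]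
      have := congrArg (List.take (s.length - (pvRt s).length - (pvRm s).length)) hdec1
      rw [this, List.take_left' hlplen]
    have hdropA : s.drop (s.length - (pvRt s).length - (pvRm s).length) = (pvRm s).reverse ++ (pvRt s).reverse := by
      have := congrArg (List.drop (s.length - (pvRt s).length - (pvRm s).length)) hdec1
      rw [this, List.drop_left' hlplen]
    have hM : PySem.List.slice s (some (((s.length : Int) - (pvRt s).length - (pvRm s).length - 1) + 1)) (some (((s.length : Int) - (pvRt s).length - 1) + 1)) = (pvRm s).reverse := by
      rw [he1, hb1, PySem.List.slice_natCast, hdropA]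
      exact List.take_left' (by rw [List.length_reverse]; omega)
    have hR : PySem.List.slice s (some (((s.length : Int) - (pvRt s).length - 1) + 1)) none = (pvRt s).reverse := by
      rw [hb1, PySem.List.slice_from s (by positivity), Int.toNat_natCast]
      have := congrArg (List.drop (s.length - (pvRt s).length)) hdec2
      rw [this, List.drop_left' (by simp; omega)]
    rw [hL, hM, hR]
    have hmne : (pvRm s).reverse ≠ [] := by simpa using h
    rw [if_neg hmne]
    rw [pv_last_star]
    cases ms <;> rfl

-- ===== VERDICT (by name: the statement is the Claim_ definition above) =====
theorem check_right_position_of_asterix_spec : Claim_equal_check_right_position_of_asterix := by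
  intro line positional _ hpre
  unfold Spec_check_right_position_of_asterix
  unfold check_right_position_of_asterix check_right_position_of_asterix_alt
  rcases hpre with ⟨hfd, -⟩ | ⟨hfd, -⟩ <;> rw [hfd] <;> dsimp only [Option.getD_some]
  · rw [if_pos rfl]
    cases PySem.Chars.splitMax? line.toList ['('] 1 with
    | none => rfl
    | some xs =>
      rcases xs with _ | ⟨a, _ | ⟨b, _ | ⟨c, t⟩⟩⟩ <;> simp only [pv_helper_eq] <;> rfl

  · rw [if_neg (by simp)]
    cases hvb : positional.lookup "variable_block" with
    | none => rfl
    | some b =>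
      cases b
      · rfl
      · simp only [pv_helper_eq]; rfl
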